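-- pv_equiv track=rewrite | github.com/apguan/auto-researchtrading | scripts/monitor_divergence.py | _consec_entry_count
-- ===== SOURCE A (Python) =====
-- from collections import defaultdict
--
-- def _consec_entry_count(trades: list) -> int:
--     """Count entries immediately followed by another entry (no exit in between)
--     for the same symbol. Each such pair indicates a sync clear / lost-position event."""
--     by_sym = defaultdict(list)
--     for t in trades:
--         by_sym[t["symbol"]].append(t)
--     consec = 0
--     for sym in by_sym:
--         ts = by_sym[sym]
--         for i in range(len(ts) - 1):
--             if ts[i]["pnl"] is None and ts[i + 1]["pnl"] is None:
--                 consec += 1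
--     return consec
-- ===== SOURCE B (Python) =====
-- def _consec_entry_count(trades: list) -> int:
--     """Count entries immediately followed by another entry (no exit in between)
--     for the same symbol, in one streaming pass: remember per symbol whether the
--     previous trade was an entry."""
--     consec = 0
--     prev_entry = {}
--     for t in trades:
--         is_entry = t["pnl"] is None
--         if is_entry and prev_entry.get(t["symbol"], False):
--             consec += 1
--         prev_entry[t["symbol"]] = is_entry
--     return consec
-- ===== Notes on version B (the rewrite author's own statement) =====
-- stated objective: simpler
-- what changed: Replaced the two-phase group-by-symbol (dict of per-symbol trade lists, then an index loop over each group) with a single streaming pass that keeps only one boolean per symbol (was the previous trade of that symbol an entry); Pre_ excludes trades missing the 'symbol' or 'pnl' key, on which A raises KeyError except that A accidentally skips reading 'pnl' of trades whose symbol group has fewer than two trades.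
-- outside the precondition, e.g. on _consec_entry_count([{'symbol': 's'}]): A returns 0, B raises KeyError
import Mathlib
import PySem

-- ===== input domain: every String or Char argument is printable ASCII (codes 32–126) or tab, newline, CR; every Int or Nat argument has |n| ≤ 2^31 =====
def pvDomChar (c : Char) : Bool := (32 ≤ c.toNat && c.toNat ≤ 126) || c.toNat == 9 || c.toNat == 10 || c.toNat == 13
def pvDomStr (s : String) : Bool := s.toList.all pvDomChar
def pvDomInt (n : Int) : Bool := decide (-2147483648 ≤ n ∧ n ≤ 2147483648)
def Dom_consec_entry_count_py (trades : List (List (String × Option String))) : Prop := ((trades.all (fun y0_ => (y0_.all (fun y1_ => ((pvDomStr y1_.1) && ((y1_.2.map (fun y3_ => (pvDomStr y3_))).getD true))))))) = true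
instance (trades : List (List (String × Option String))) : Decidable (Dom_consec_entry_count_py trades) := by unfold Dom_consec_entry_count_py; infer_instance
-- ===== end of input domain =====

-- B replaces A's group-by-symbol-then-scan-each-group with a single streaming pass that
-- keeps one boolean per symbol ("was the previous trade of this symbol an entry"); objective: simpler.

-- ===== PORT A =====
-- a trade dict is its association list; t["symbol"] / t["pnl"] ported via Dict.getD,
-- exact under Pre_ (which requires both keys present; Python raises KeyError otherwise)
def pvTradeKey (t : List (String × Option String)) : Option String :=
  PySem.Dict.getD (PySem.Dict.mk t) "symbol" none

def pvTradeEntry (t : List (String × Option String)) : Bool :=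
  PySem.Dict.getD (PySem.Dict.mk t) "pnl" none == none

-- the inner 'for i in range(len(ts)-1): if ts[i]["pnl"] is None and ts[i+1]["pnl"] is None: consec += 1'
-- as the obvious structural recursion over adjacent pairs
def pvPairCount : List (List (String × Option String)) → Int
  | a :: b :: rest => (if pvTradeEntry a && pvTradeEntry b then 1 else 0) + pvPairCount (b :: rest)
  | _ => 0

-- the second loop of A: 'for sym in by_sym: … consec += …'
def pvGroupSum (by_sym : PySem.Dict (Option String) (List (List (String × Option String)))) : Int :=
  by_sym.keys.foldl (fun consec sym => consec + pvPairCount (by_sym.getD sym [])) 0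

def consec_entry_count_py (trades : List (List (String × Option String))) : Int :=
  pvGroupSum (trades.foldl
    (fun d t => PySem.Dict.modify d (pvTradeKey t) [] (· ++ [t]))
    PySem.Dict.empty)

-- ===== PORT B =====
def consec_entry_count_py_alt (trades : List (List (String × Option String))) : Int :=
  (trades.foldl
    (fun (st : Int × PySem.Dict (Option String) Bool) t =>
      let is_entry := pvTradeEntry t
      ((if is_entry && st.2.getD (pvTradeKey t) false then st.1 + 1 else st.1),
       st.2.insert (pvTradeKey t) is_entry))
    (0, PySem.Dict.empty)).1

-- ===== PRECONDITION & SPEC =====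
-- Pre_ excludes trades missing the "symbol" or "pnl" key: Python A raises KeyError there, except that
-- A accidentally never reads "pnl" of a trade whose symbol group has fewer than two trades (an artefact
-- of its two-phase scan), so it can still return 0 on such inputs; B reads "pnl" of every trade.
def Pre_consec_entry_count_py (trades : List (List (String × Option String))) : Prop :=
  ∀ t ∈ trades, ((PySem.Dict.mk t).contains "symbol" = true) ∧ ((PySem.Dict.mk t).contains "pnl" = true)
instance (trades : List (List (String × Option String))) : Decidable (Pre_consec_entry_count_py trades) := by
  unfold Pre_consec_entry_count_py; infer_instance

def pvWitness_consec_entry_count_py : (List (List (String × Option String))) :=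
  [[("symbol", some "AAPL"), ("pnl", none)], [("symbol", some "AAPL"), ("pnl", none)]]

def Spec_consec_entry_count_py (trades : List (List (String × Option String))) (out : Int) : Prop := out = consec_entry_count_py_alt trades
instance (trades : List (List (String × Option String))) (out : Int) : Decidable (Spec_consec_entry_count_py trades out) := by unfold Spec_consec_entry_count_py; infer_instance

-- ===== CLAIM (what is proved, stated in full; the proofs are below) =====
def Claim_equal_consec_entry_count_py : Prop := ∀ (trades : List (List (String × Option String))), Dom_consec_entry_count_py trades → Pre_consec_entry_count_py trades → Spec_consec_entry_count_py trades (consec_entry_count_py trades)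

-- ===== LEMMAS AND PROOFS =====

-- the trades of symbol k, in order
def pvFilt (k : Option String) (xs : List (List (String × Option String))) :
    List (List (String × Option String)) :=
  xs.filter (fun t => pvTradeKey t == k)

-- whether the last trade of a list is an entry (false on the empty list)
def pvLastE (l : List (List (String × Option String))) : Bool :=
  (l.getLast?.map pvTradeEntry).getD false

-- common reference value: sum over a key list of per-symbol adjacent-entry-pair counts
def pvTotal (ks : List (Option String)) (xs : List (List (String × Option String))) : Int :=
  ks.foldl (fun c k => c + pvPairCount (pvFilt k xs)) 0

-- B's fold, named for the proofs (definitionally B's port)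
def pvBFold (xs : List (List (String × Option String))) :
    Int × PySem.Dict (Option String) Bool :=
  xs.foldl
    (fun (st : Int × PySem.Dict (Option String) Bool) t =>
      let is_entry := pvTradeEntry t
      ((if is_entry && st.2.getD (pvTradeKey t) false then st.1 + 1 else st.1),
       st.2.insert (pvTradeKey t) is_entry))
    (0, PySem.Dict.empty)

theorem pvPairCount_cons_cons (a b : List (String × Option String))
    (r : List (List (String × Option String))) :
    pvPairCount (a :: b :: r) =
      (if pvTradeEntry a && pvTradeEntry b then 1 else 0) + pvPairCount (b :: r) := rfl

theorem pvPairCount_append_singleton (l : List (List (String × Option String)))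
    (t : List (String × Option String)) :
    pvPairCount (l ++ [t]) =
      pvPairCount l + (if pvTradeEntry t && pvLastE l then 1 else 0) := by
  induction l with
  | nil => simp [pvPairCount, pvLastE]
  | cons a l ih =>
    cases l with
    | nil => simp [pvPairCount, pvLastE, Bool.and_comm]
    | cons b r =>
      rw [show (a :: b :: r) ++ [t] = a :: b :: (r ++ [t]) from rfl]
      rw [List.cons_append] at ih
      rw [pvPairCount_cons_cons a b (r ++ [t]), pvPairCount_cons_cons a b r, ih]
      have h3 : pvLastE (a :: b :: r) = pvLastE (b :: r) := by simp [pvLastE]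
      rw [h3]; ring

theorem pvFilt_append (k : Option String) (xs : List (List (String × Option String)))
    (t : List (String × Option String)) :
    pvFilt k (xs ++ [t]) = pvFilt k xs ++ (if pvTradeKey t == k then [t] else []) := by
  by_cases h : (pvTradeKey t == k) = true <;>
    simp [pvFilt, List.filter_append, h]

theorem pvFilt_eq_nil (k : Option String) (xs : List (List (String × Option String)))
    (h : k ∉ xs.map pvTradeKey) : pvFilt k xs = [] := by
  refine List.filter_eq_nil_iff.mpr (fun a ha hk => ?_)
  exact h (List.mem_map.mpr ⟨a, ha, by simpa using hk⟩)

theorem pv_sum_point (ks : List (Option String)) (f : Option String → Int)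
    (k0 : Option String) (δ : Int) (hnd : ks.Nodup) (hmem : k0 ∈ ks) :
    (ks.map (fun k => f k + if k = k0 then δ else 0)).sum = (ks.map f).sum + δ := by
  induction ks with
  | nil => cases hmem
  | cons a ks ih =>
    rcases List.mem_cons.mp hmem with rfl | h
    · have hnotin : k0 ∉ ks := (List.nodup_cons.mp hnd).1
      have heq : ks.map (fun k => f k + if k = k0 then δ else 0) = ks.map f :=
        List.map_congr_left (fun x hx => by
          have hx' : x ≠ k0 := fun e => hnotin (e ▸ hx)
          simp [hx'])
      simp only [List.map_cons, List.sum_cons, heq]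
      rw [if_pos trivial]
      ring
    · have hak : a ≠ k0 := fun e => (List.nodup_cons.mp hnd).1 (e ▸ h)
      have ih' := ih (List.nodup_cons.mp hnd).2 h
      simp only [List.map_cons, List.sum_cons, if_neg hak, ih']; ring

theorem pvTotal_eq_sum (ks : List (Option String)) (ys : List (List (String × Option String))) :
    pvTotal ks ys = (ks.map (fun k => pvPairCount (pvFilt k ys))).sum := by
  unfold pvTotal; rw [PySem.List.foldl_add]; simp

theorem pvTotal_append_singleton (xs : List (List (String × Option String)))
    (t : List (String × Option String)) :
    pvTotal (PySem.Set.ofList ((xs ++ [t]).map pvTradeKey)) (xs ++ [t])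
      = pvTotal (PySem.Set.ofList (xs.map pvTradeKey)) xs
        + (if pvTradeEntry t && pvLastE (pvFilt (pvTradeKey t) xs) then 1 else 0) := by
  set S := PySem.Set.ofList (xs.map pvTradeKey) with hS
  have hSets : PySem.Set.ofList ((xs ++ [t]).map pvTradeKey)
      = PySem.Set.add S (pvTradeKey t) := by
    rw [List.map_append, show List.map pvTradeKey [t] = [pvTradeKey t] from rfl,
      PySem.Set.ofList_append, PySem.Set.update_cons, PySem.Set.update_nil]
  have hnd : S.Nodup := PySem.Set.nodup_ofList _
  rw [hSets, pvTotal_eq_sum, pvTotal_eq_sum]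
  by_cases hmem : pvTradeKey t ∈ S
  · have hadd : PySem.Set.add S (pvTradeKey t) = S := by
      simp [PySem.Set.add, PySem.Set.contains, hmem]
    rw [hadd]
    have hpt : S.map (fun k => pvPairCount (pvFilt k (xs ++ [t])))
        = S.map (fun k => pvPairCount (pvFilt k xs)
            + if k = pvTradeKey t then
                (if pvTradeEntry t && pvLastE (pvFilt (pvTradeKey t) xs) then 1 else 0) else 0) := by
      refine List.map_congr_left (fun k _ => ?_)
      by_cases hk : k = pvTradeKey t
      · subst hk
        rw [pvFilt_append, if_pos (by simp), pvPairCount_append_singleton]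
        simp
      · have hb : (pvTradeKey t == k) = false := beq_eq_false_iff_ne.mpr (fun e => hk e.symm)
        rw [pvFilt_append, hb]
        simp [hk]
    rw [hpt, pv_sum_point S _ (pvTradeKey t) _ hnd hmem]
  · have hadd : PySem.Set.add S (pvTradeKey t) = S ++ [pvTradeKey t] := by
      simp [PySem.Set.add, PySem.Set.contains, hmem]
    have hnil : pvFilt (pvTradeKey t) xs = [] := by
      refine pvFilt_eq_nil _ _ (fun hc => hmem ?_)
      rw [hS]; exact (PySem.Set.mem_ofList _ _).mpr hc
    rw [hadd, List.map_append, List.sum_append]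
    have hsame : S.map (fun k => pvPairCount (pvFilt k (xs ++ [t])))
        = S.map (fun k => pvPairCount (pvFilt k xs)) := by
      refine List.map_congr_left (fun k hkS => ?_)
      have hk : k ≠ pvTradeKey t := fun e => hmem (e ▸ hkS)
      have hb : (pvTradeKey t == k) = false := beq_eq_false_iff_ne.mpr (fun e => hk e.symm)
      rw [pvFilt_append, hb]; simp
    have hnew : pvPairCount (pvFilt (pvTradeKey t) (xs ++ [t])) = 0 := by
      rw [pvFilt_append, if_pos (by simp), hnil]
      rfl
    rw [hsame]
    simp [hnew, hnil, pvLastE]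

theorem pvBFold_invariant (xs : List (List (String × Option String))) :
    (pvBFold xs).1 = pvTotal (PySem.Set.ofList (xs.map pvTradeKey)) xs
    ∧ ∀ k, (pvBFold xs).2.getD k false = pvLastE (pvFilt k xs) := by
  induction xs using List.reverseRecOn with
  | nil =>
    constructor
    · simp [pvBFold, pvTotal]
    · intro k; simp [pvBFold, pvFilt, pvLastE, PySem.Dict.getD_empty]
  | append_singleton xs t ih =>
    have hstep : pvBFold (xs ++ [t]) =
        ((if pvTradeEntry t && (pvBFold xs).2.getD (pvTradeKey t) false
            then (pvBFold xs).1 + 1 else (pvBFold xs).1),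
         (pvBFold xs).2.insert (pvTradeKey t) (pvTradeEntry t)) := by
      simp [pvBFold, List.foldl_append]
    constructor
    · rw [hstep]
      simp only []
      rw [ih.2, ih.1, pvTotal_append_singleton]
      by_cases h : (pvTradeEntry t && pvLastE (pvFilt (pvTradeKey t) xs)) = true <;> simp [h]
    · intro k
      rw [hstep]
      simp only []
      rw [PySem.Dict.getD_insert]
      by_cases hk : k = pvTradeKey t
      · subst hk
        rw [if_pos rfl, pvFilt_append, if_pos (by simp)]
        simp [pvLastE]
      · have hb : (pvTradeKey t == k) = false := beq_eq_false_iff_ne.mpr (fun e => hk e.symm)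
        rw [if_neg hk, pvFilt_append, hb, ih.2]
        simp

theorem consec_entry_count_py_eq_total (trades : List (List (String × Option String))) :
    consec_entry_count_py trades =
      pvTotal (PySem.Set.ofList (trades.map pvTradeKey)) trades := by
  unfold consec_entry_count_py pvGroupSum
  set d := trades.foldl
    (fun d t => PySem.Dict.modify d (pvTradeKey t) [] (· ++ [t])) PySem.Dict.empty with hd
  have hkeys : d.keys = PySem.Set.ofList (trades.map pvTradeKey) := by
    rw [hd]
    rw [PySem.Dict.keys_foldl_modify_key trades pvTradeKey [] (fun _ t => (· ++ [t])) PySem.Dict.empty]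
    rw [PySem.Dict.keys_empty]
    exact PySem.Set.update_empty _
  have hgetD : ∀ c, d.getD c [] = pvFilt c trades := by
    intro c
    have hmap : d = (trades.map (fun t => (pvTradeKey t, t))).foldl
        (fun d p => PySem.Dict.modify d p.1 [] (· ++ [p.2])) PySem.Dict.empty := by
      rw [hd, List.foldl_map]
    rw [hmap, PySem.Dict.getD_foldl_modify_append]
    rw [PySem.Dict.getD_empty, List.nil_append, List.filter_map]
    have : ((fun (p : Option String × List (String × Option String)) => p.1 == c) ∘
        (fun t => (pvTradeKey t, t))) = (fun t => pvTradeKey t == c) := rfl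
    rw [this]
    have h2 : ∀ l : List (List (String × Option String)),
        List.map ((fun (x : Option String × List (String × Option String)) => x.2) ∘
          fun t => (pvTradeKey t, t)) l = l := by
      intro l
      induction l with
      | nil => rfl
      | cons a l ih => simp only [List.map_cons, Function.comp_apply, ih]
    rw [List.map_map, h2]
    rfl
  rw [hkeys]
  unfold pvTotal
  exact PySem.List.foldl_congr_mem _ _ _ 0 (fun acc x _ => by rw [hgetD])

theorem consec_entry_count_py_alt_eq_total (trades : List (List (String × Option String))) :
    consec_entry_count_py_alt trades =
      pvTotal (PySem.Set.ofList (trades.map pvTradeKey)) trades := by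
  have h : consec_entry_count_py_alt trades = (pvBFold trades).1 := rfl
  rw [h, (pvBFold_invariant trades).1]

-- ===== VERDICT (by name: the statement is the Claim_ definition above) =====
theorem consec_entry_count_py_spec : Claim_equal_consec_entry_count_py := by
  intro trades _ _
  unfold Spec_consec_entry_count_py
  rw [consec_entry_count_py_eq_total, consec_entry_count_py_alt_eq_total]
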